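-- pv_equiv track=rewrite | github.com/cinience/alicloud-skills | scripts/generate_readme_skill_sections.py | render_included
-- ===== SOURCE A (Python) =====
-- GROUP_ORDER = [
--     "ai",
--     "storage",
--     "compute",
--     "database",
--     "network",
--     "media",
--     "observability",
--     "backup",
--     "data-lake",
--     "data-analytics",
--     "platform",
--     "security",
-- ]
--
-- def _group_sort_key(group: str) -> tuple[int, str]:
--     if group in GROUP_ORDER:
--         return (GROUP_ORDER.index(group), group)
--     return (len(GROUP_ORDER), group)
--
-- def render_included(rows: list[tuple[str, str, str]], language: str) -> str:
--     grouped: dict[str, list[str]] = {}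
--     for top, short_path, _ in rows:
--         grouped.setdefault(top, []).append(short_path)
--
--     lines: list[str] = []
--     for group in sorted(grouped.keys(), key=_group_sort_key):
--         if language == "en":
--             lines.append(f"Located in `skills/{group}/`:")
--         elif language == "zh-tw":
--             lines.append(f"位於 `skills/{group}/`：")
--         else:
--             lines.append(f"位于 `skills/{group}/`：")
--         lines.append("")
--         for short in sorted(grouped[group]):
--             lines.append(f"- `{short}`")
--         lines.append("")
--     return "\n".join(lines).rstrip() + "\n"
-- ===== SOURCE B (Python) =====
-- GROUP_ORDER = [
--     "ai",
--     "storage",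
--     "compute",
--     "database",
--     "network",
--     "media",
--     "observability",
--     "backup",
--     "data-lake",
--     "data-analytics",
--     "platform",
--     "security",
-- ]
--
-- def _group_sort_key(group: str) -> tuple[int, str]:
--     if group in GROUP_ORDER:
--         return (GROUP_ORDER.index(group), group)
--     return (len(GROUP_ORDER), group)
--
-- def render_included(rows: list[tuple[str, str, str]], language: str) -> str:
--     # One global sort of (top, short) pairs, then a single change-detecting pass.
--     if language == "en":
--         header = "Located in `skills/{}/`:".format
--     elif language == "zh-tw":
--         header = "位於 `skills/{}/`：".format
--     else:
--         header = "位于 `skills/{}/`：".format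
--     out: list[str] = []
--     prev = None
--     for top, short in sorted(((t, s) for t, s, _ in rows),
--                              key=lambda p: (_group_sort_key(p[0]), p[1])):
--         if top != prev:
--             if prev is not None:
--                 out.append("")
--             out.append(header(top))
--             out.append("")
--             prev = top
--         out.append(f"- `{short}`")
--     return "\n".join(out).rstrip() + "\n"
-- ===== Notes on version B (the rewrite author's own statement) =====
-- stated objective: alternative
-- what changed: B drops the dict-of-lists and the per-group inner sorts: it sorts the (top, short) pairs once by the composite key (_group_sort_key(top), short) and renders the markdown in a single change-detecting pass over that sorted list.
import Mathlib
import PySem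

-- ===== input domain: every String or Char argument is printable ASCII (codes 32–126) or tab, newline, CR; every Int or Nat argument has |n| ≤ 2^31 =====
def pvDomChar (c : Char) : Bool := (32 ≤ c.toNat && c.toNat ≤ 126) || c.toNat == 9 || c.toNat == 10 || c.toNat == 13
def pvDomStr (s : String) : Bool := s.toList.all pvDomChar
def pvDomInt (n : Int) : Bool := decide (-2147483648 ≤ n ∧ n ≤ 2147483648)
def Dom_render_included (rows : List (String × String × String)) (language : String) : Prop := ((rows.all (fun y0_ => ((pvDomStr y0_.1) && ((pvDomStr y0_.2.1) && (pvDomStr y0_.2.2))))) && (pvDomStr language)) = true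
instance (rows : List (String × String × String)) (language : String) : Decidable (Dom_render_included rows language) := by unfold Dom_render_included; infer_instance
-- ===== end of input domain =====

-- B replaces A's dict-of-lists + per-group sort by one global sort of (top, short)
-- pairs and a single change-detecting pass (objective: alternative decomposition).

-- ===== PORT A =====
def GROUP_ORDER : List String :=
  ["ai", "storage", "compute", "database", "network", "media",
   "observability", "backup", "data-lake", "data-analytics", "platform", "security"]
def group_sort_key (group : String) : Int × String :=
  if GROUP_ORDER.contains group then
    (((PySem.List.index? GROUP_ORDER group).getD 0 : Nat), group)
  else
    ((GROUP_ORDER.length : Int), group)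
def render_included (rows : List (String × String × String)) (language : String) : String :=
  let grouped : PySem.Dict String (List String) :=
    rows.foldl (fun d r => d.modify r.1 [] (fun l => l ++ [r.2.1])) PySem.Dict.empty
  let lines : List String :=
    (PySem.List.sorted2 grouped.keys
        (fun g => (group_sort_key g).1) (fun g => (group_sort_key g).2)).foldl
      (fun lines group =>
        let lines :=
          if language == "en" then lines ++ ["Located in `skills/" ++ group ++ "/`:"]
          else if language == "zh-tw" then lines ++ ["位於 `skills/" ++ group ++ "/`："]
          else lines ++ ["位于 `skills/" ++ group ++ "/`："]
        let lines := lines ++ [""]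
        let lines :=
          (PySem.List.sorted (grouped.getD group []) (fun s => s)).foldl
            (fun ls s => ls ++ ["- `" ++ s ++ "`"]) lines
        lines ++ [""]) []
  PySem.Str.rstrip (PySem.Str.join "\n" lines) ++ "\n"
-- ===== PORT B =====
def render_included_alt (rows : List (String × String × String)) (language : String) : String :=
  let header : String → String :=
    if language == "en" then (fun g => "Located in `skills/" ++ g ++ "/`:")
    else if language == "zh-tw" then (fun g => "位於 `skills/" ++ g ++ "/`：")
    else (fun g => "位于 `skills/" ++ g ++ "/`：")
  let ordered : List (String × String) :=
    PySem.List.sorted2 (rows.map (fun r => (r.1, r.2.1)))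
      (fun p => (toLex (group_sort_key p.1) : Int ×ₗ String)) (fun p => p.2)
  let st : List String × Option String :=
    ordered.foldl
      (fun (st : List String × Option String) p =>
        let upd : List String × Option String :=
          if st.2 ≠ some p.1 then
            ((if st.2 = none then st.1 else st.1 ++ [""]) ++ [header p.1, ""], some p.1)
          else st
        (upd.1 ++ ["- `" ++ p.2 ++ "`"], upd.2))
      ([], none)
  PySem.Str.rstrip (PySem.Str.join "\n" st.1) ++ "\n"
-- ===== PRECONDITION & SPEC =====
def Spec_render_included (rows : List (String × String × String)) (language : String) (out : String) : Prop := out = render_included_alt rows language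
instance (rows : List (String × String × String)) (language : String) (out : String) : Decidable (Spec_render_included rows language out) := by unfold Spec_render_included; infer_instance

-- ===== CLAIM (what is proved, stated in full; the proofs are below) =====
def Claim_equal_render_included : Prop := ∀ (rows : List (String × String × String)) (language : String), Dom_render_included rows language → Spec_render_included rows language (render_included rows language)

-- ===== LEMMAS AND PROOFS =====

-- definitions used only by the proofs
def gkeyL (g : String) : Int ×ₗ String := toLex (group_sort_key g)
def pkeyL (p : String × String) : (Int ×ₗ String) ×ₗ String := toLex (gkeyL p.1, p.2)
def pairsOf (rows : List (String × String × String)) : List (String × String) :=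
  rows.map (fun r => (r.1, r.2.1))
def shortsOf (l : List (String × String)) (g : String) : List String :=
  (l.filter (fun p => p.1 == g)).map (·.2)
def hdrF (language : String) : String → String := fun group =>
  if language == "en" then "Located in `skills/" ++ group ++ "/`:"
  else if language == "zh-tw" then "位於 `skills/" ++ group ++ "/`："
  else "位于 `skills/" ++ group ++ "/`："
def itemF (s : String) : String := "- `" ++ s ++ "`"
def itemsF (l : List (String × String)) (g : String) : List String :=
  (PySem.List.sorted (shortsOf l g) (fun s => s)).map itemF
def blkF (l : List (String × String)) (g : String) : List (String × String) :=
  (PySem.List.sorted (shortsOf l g) (fun s => s)).map (fun s => (g, s))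
def stepF (hdr : String → String) (st : List String × Option String) (p : String × String) :
    List String × Option String :=
  let upd : List String × Option String :=
    if st.2 ≠ some p.1 then
      ((if st.2 = none then st.1 else st.1 ++ [""]) ++ [hdr p.1, ""], some p.1)
    else st
  (upd.1 ++ ["- `" ++ p.2 ++ "`"], upd.2)
theorem sorted2_eq_sorted_toLex {α κ₁ κ₂ : Type} [LinearOrder κ₁] [LinearOrder κ₂]
    (xs : List α) (k1 : α → κ₁) (k2 : α → κ₂) :
    PySem.List.sorted2 xs k1 k2 = PySem.List.sorted xs (fun x => (toLex (k1 x, k2 x) : κ₁ ×ₗ κ₂)) := by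
  rw [PySem.List.sorted_eq_foldl_insertBy]
  unfold PySem.List.sorted2
  simp only [reduceIte]
  congr 1
  funext acc x
  congr 1
  funext a b
  rcases lt_trichotomy (k1 a) (k1 b) with h | h | h
  · simp [Prod.Lex.lt_iff, h, lt_asymm h]
  · simp [Prod.Lex.lt_iff, h]
  · simp [Prod.Lex.lt_iff, h, lt_asymm h, h.ne']

theorem keys_grouped (rows : List (String × String × String)) :
    (rows.foldl (fun d r => d.modify r.1 [] (fun l => l ++ [r.2.1]))
      (PySem.Dict.empty : PySem.Dict String (List String))).keys
      = PySem.List.dedup (rows.map (·.1)) := by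
  rw [PySem.Dict.keys_foldl_modify_key rows (fun r => r.1) [] (fun _ r => fun l => l ++ [r.2.1]) PySem.Dict.empty]
  simp [pysem, PySem.Dict.empty, PySem.Set.update, PySem.Set.ofList, PySem.List.dedup]

theorem getD_grouped (rows : List (String × String × String)) (g : String) :
    (rows.foldl (fun d r => d.modify r.1 [] (fun l => l ++ [r.2.1]))
      (PySem.Dict.empty : PySem.Dict String (List String))).getD g []
      = shortsOf (pairsOf rows) g := by
  have h : rows.foldl (fun d r => d.modify r.1 [] (fun l => l ++ [r.2.1]))
      (PySem.Dict.empty : PySem.Dict String (List String))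
      = (pairsOf rows).foldl (fun d p => d.modify p.1 [] (fun l => l ++ [p.2])) PySem.Dict.empty := by
    rw [pairsOf, List.foldl_map]
  rw [h, PySem.Dict.getD_foldl_modify_append]
  simp [shortsOf, pysem]

theorem filter_eq_map_shorts (l : List (String × String)) (g : String) :
    l.filter (fun p => p.1 == g) = (shortsOf l g).map (fun s => (g, s)) := by
  induction l with
  | nil => simp [shortsOf]
  | cons p t ih =>
    by_cases h : p.1 = g
    · simp [shortsOf, h] at ih ⊢
      exact ⟨(Prod.ext (by simp [h]) rfl), ih⟩
    · simp [shortsOf, h] at ih ⊢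
      exact ih

theorem sum_map_ite_mem (gs : List String) (t : String) (x : Nat) (hnd : gs.Nodup) :
    ((gs.map (fun g => if t = g then x else 0)).sum) = if t ∈ gs then x else 0 := by
  induction gs with
  | nil => simp
  | cons g gs ih =>
    rcases List.nodup_cons.mp hnd with ⟨hg, hnd'⟩
    by_cases h : t = g
    · subst h
      simp [ih hnd', hg]
    · simp [h, ih hnd']

theorem dedup_partition_perm (l : List (String × String)) :
    ((PySem.List.dedup (l.map Prod.fst)).flatMap (fun g => l.filter (fun p => p.1 == g))).Perm l := by
  rw [List.perm_iff_count]
  intro a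
  rw [List.count_flatMap]
  have hcnt : ∀ g, List.count a (l.filter (fun p => p.1 == g)) = if a.1 = g then List.count a l else 0 := by
    intro g
    by_cases h : a.1 = g
    · rw [if_pos h, List.count_filter (by simp [h])]
    · rw [if_neg h, List.count_eq_zero]
      intro hm
      exact h (by simpa using (List.mem_filter.mp hm).2)
  have : (PySem.List.dedup (l.map Prod.fst)).map (List.count a ∘ fun g => l.filter (fun p => p.1 == g))
      = (PySem.List.dedup (l.map Prod.fst)).map (fun g => if a.1 = g then List.count a l else 0) := by
    exact List.map_congr_left (fun g _ => hcnt g)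
  rw [this, sum_map_ite_mem _ _ _ (PySem.List.nodup_dedup _)]
  by_cases hm : a.1 ∈ PySem.List.dedup (l.map Prod.fst)
  · rw [if_pos hm]
  · rw [if_neg hm]
    refine (List.count_eq_zero.mpr ?_).symm
    intro hal
    exact hm ((PySem.List.mem_dedup _ _).mpr (List.mem_map_of_mem hal))

theorem flatMap_perm_congr {α β : Type} (gs : List α) (f h : α → List β)
    (hp : ∀ g ∈ gs, (f g).Perm (h g)) : (gs.flatMap f).Perm (gs.flatMap h) := by
  induction gs with
  | nil => simp
  | cons g t ih =>
    simp only [List.flatMap_cons]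
    exact (hp g (by simp)).append (ih (fun x hx => hp x (by simp [hx])))

theorem snd_gsk (g : String) : (group_sort_key g).2 = g := by
  unfold group_sort_key; split_ifs <;> rfl

theorem gkeyL_injective : Function.Injective gkeyL := by
  intro a b h
  have := congrArg (fun x => (ofLex x).2) h
  simpa [gkeyL, snd_gsk] using this

theorem pkeyL_injective : Function.Injective pkeyL := by
  intro a b h
  have h1 := congrArg (fun x => (ofLex x).1) h
  have h2 := congrArg (fun x => (ofLex x).2) h
  simp [pkeyL] at h1 h2
  exact Prod.ext (gkeyL_injective h1) h2

theorem ordered_blocks (l : List (String × String)) :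
    PySem.List.sorted l pkeyL
      = (PySem.List.sorted (PySem.List.dedup (l.map Prod.fst)) gkeyL).flatMap (blkF l) := by
  set gs := PySem.List.sorted (PySem.List.dedup (l.map Prod.fst)) gkeyL with hgs
  have hgsperm : gs.Perm (PySem.List.dedup (l.map Prod.fst)) := PySem.List.sorted_perm _ _ _
  have hgsnd : gs.Nodup := hgsperm.symm.nodup (PySem.List.nodup_dedup _)
  have hgspw : gs.Pairwise (fun a b => gkeyL a ≤ gkeyL b) := PySem.List.sorted_pairwise _ _
  -- permutation
  have hblk : ∀ g, (blkF l g).Perm (l.filter (fun p => p.1 == g)) := by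
    intro g
    rw [filter_eq_map_shorts]
    exact ((PySem.List.sorted_perm _ _ _).map _)
  have hperm : (gs.flatMap (blkF l)).Perm l := by
    have p1 : (gs.flatMap (blkF l)).Perm (gs.flatMap (fun g => l.filter (fun p => p.1 == g))) :=
      flatMap_perm_congr _ _ _ (fun g _ => hblk g)
    have p2 : (gs.flatMap (fun g => l.filter (fun p => p.1 == g))).Perm
        ((PySem.List.dedup (l.map Prod.fst)).flatMap (fun g => l.filter (fun p => p.1 == g))) :=
      hgsperm.flatMap (fun a _ => List.Perm.refl _)
    exact (p1.trans p2).trans (dedup_partition_perm l)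
  -- pairwise
  have hpwB : (gs.flatMap (blkF l)).Pairwise (fun a b => pkeyL a ≤ pkeyL b) := by
    rw [List.flatMap]
    rw [List.pairwise_flatten]
    constructor
    · intro blk hblk'
      rcases List.mem_map.mp hblk' with ⟨g, _, rfl⟩
      have hs : (PySem.List.sorted (shortsOf l g) (fun s => s)).Pairwise (fun a b => a ≤ b) :=
        PySem.List.sorted_pairwise _ _
      rw [blkF, List.pairwise_map]
      refine hs.imp ?_
      intro a b hab
      simp [pkeyL, Prod.Lex.le_iff, hab]
    · rw [List.pairwise_map]
      have := hgspw.and (List.nodup_iff_pairwise_ne.mp hgsnd)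
      refine this.imp ?_
      rintro g g' ⟨hle, hne⟩ x hx y hy
      have hxg : x.1 = g := by
        rcases List.mem_map.mp hx with ⟨s, _, rfl⟩; rfl
      have hyg : y.1 = g' := by
        rcases List.mem_map.mp hy with ⟨s, _, rfl⟩; rfl
      have hlt : gkeyL g < gkeyL g' := lt_of_le_of_ne hle (fun e => hne (gkeyL_injective e))
      simp [pkeyL, Prod.Lex.le_iff, hxg, hyg]
      exact Or.inl hlt
  have hpwA : (PySem.List.sorted l pkeyL).Pairwise (fun a b => pkeyL a ≤ pkeyL b) :=
    PySem.List.sorted_pairwise _ _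
  exact PySem.List.eq_of_perm_of_pairwise_le_of_injective pkeyL pkeyL_injective
    ((PySem.List.sorted_perm _ _ _).trans hperm.symm) hpwA hpwB

theorem linesA_eq (language : String) (gs : List String) (l : List (String × String))
    (getd : String → List String) (hg : ∀ g ∈ gs, getd g = shortsOf l g) :
    gs.foldl
      (fun lines group =>
        let lines :=
          if language == "en" then lines ++ ["Located in `skills/" ++ group ++ "/`:"]
          else if language == "zh-tw" then lines ++ ["位於 `skills/" ++ group ++ "/`："]
          else lines ++ ["位于 `skills/" ++ group ++ "/`："]
        let lines := lines ++ [""]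
        let lines :=
          (PySem.List.sorted (getd group) (fun s => s)).foldl
            (fun ls s => ls ++ ["- `" ++ s ++ "`"]) lines
        lines ++ [""]) []
      = gs.flatMap (fun g => hdrF language g :: "" :: itemsF l g ++ [""]) := by
  have hb : ∀ (acc : List String), ∀ g ∈ gs,
      (fun lines group =>
        let lines :=
          if language == "en" then lines ++ ["Located in `skills/" ++ group ++ "/`:"]
          else if language == "zh-tw" then lines ++ ["位於 `skills/" ++ group ++ "/`："]
          else lines ++ ["位于 `skills/" ++ group ++ "/`："]
        let lines := lines ++ [""]
        let lines :=
          (PySem.List.sorted (getd group) (fun s => s)).foldl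
            (fun ls s => ls ++ ["- `" ++ s ++ "`"]) lines
        lines ++ [""]) acc g
      = acc ++ (hdrF language g :: "" :: itemsF l g ++ [""]) := by
    intro acc g hgm
    simp only [PySem.List.foldl_append_singleton_eq_map, hg g hgm]
    simp only [hdrF, itemsF]
    split_ifs <;> simp [itemF]
  rw [PySem.List.foldl_congr_mem _ _ _ _ hb]
  rw [PySem.List.foldl_append_eq_flatMap]
  simp

theorem loop_block (hdr : String → String) (g : String) (ss : List String) (out : List String) :
    (ss.map (fun s => (g, s))).foldl (stepF hdr) (out, some g) = (out ++ ss.map itemF, some g) := by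
  induction ss generalizing out with
  | nil => simp
  | cons s t ih =>
    simp only [List.map_cons, List.foldl_cons]
    rw [show stepF hdr (out, some g) (g, s) = (out ++ [itemF s], some g) by simp [stepF, itemF]]
    rw [ih]
    simp

theorem loop_one_block (hdr : String → String) (g : String) (s0 : String) (ss : List String)
    (out : List String) (prev : Option String) (h : prev ≠ some g) :
    (((s0 :: ss).map (fun s => (g, s))).foldl (stepF hdr) (out, prev))
      = ((if prev = none then out else out ++ [""]) ++ hdr g :: "" :: (s0 :: ss).map itemF, some g) := by
  simp only [List.map_cons, List.foldl_cons]
  rw [show stepF hdr (out, prev) (g, s0)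
      = (((if prev = none then out else out ++ [""]) ++ [hdr g, ""]) ++ [itemF s0], some g) by
    simp [stepF, itemF, h]]
  rw [loop_block]
  simp

theorem loop_main (hdr : String → String) (l : List (String × String)) :
    ∀ (gs : List String) (out : List String) (p : String),
    (∀ g ∈ gs, g ≠ p) → gs.Pairwise (· ≠ ·) → (∀ g ∈ gs, shortsOf l g ≠ []) →
    ((gs.flatMap (blkF l)).foldl (stepF hdr) (out, some p))
      = (out ++ gs.flatMap (fun g => "" :: hdr g :: "" :: itemsF l g), some (gs.getLastD p)) := by
  intro gs
  induction gs with
  | nil => simp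
  | cons g rest ih =>
    intro out p hne hpw hnil
    simp only [List.flatMap_cons, List.foldl_append]
    obtain ⟨s0, ss, hss⟩ : ∃ s0 ss, PySem.List.sorted (shortsOf l g) (fun s => s) = s0 :: ss := by
      rcases hs : PySem.List.sorted (shortsOf l g) (fun s => s) with _ | ⟨s0, ss⟩
      · exact absurd ((PySem.List.sorted_eq_nil_iff _ _ _).mp hs) (hnil g (by simp))
      · exact ⟨s0, ss, rfl⟩
    rw [blkF, hss, loop_one_block hdr g s0 ss out (some p)
      (by simpa using (Ne.symm (hne g (by simp))))]
    rw [ih _ g (fun g' hg' => (List.pairwise_cons.mp hpw).1 g' hg' |>.symm)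
      (List.pairwise_cons.mp hpw).2 (fun g' hg' => hnil g' (by simp [hg']))]
    simp [itemsF, hss]
    cases rest with
    | nil => simp
    | cons a t =>
      rw [List.getLast?_eq_some_getLast (by simp : (a :: t) ≠ [])]
      rfl

theorem linesAB (hdr : String → String) (l : List (String × String)) (g0 : String) (rest : List String) :
    (g0 :: rest).flatMap (fun g => hdr g :: "" :: itemsF l g ++ [""])
      = ((hdr g0 :: "" :: itemsF l g0) ++ rest.flatMap (fun g => "" :: hdr g :: "" :: itemsF l g)) ++ [""] := by
  induction rest generalizing g0 with
  | nil => simp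
  | cons g1 t ih =>
    have h1 : (g0 :: g1 :: t).flatMap (fun g => hdr g :: "" :: itemsF l g ++ [""])
        = (hdr g0 :: "" :: itemsF l g0 ++ [""]) ++ (g1 :: t).flatMap (fun g => hdr g :: "" :: itemsF l g ++ [""]) := by
      simp
    rw [h1, ih g1]
    simp

theorem join_append_blank (sep : List Char) (xs : List (List Char)) (h : xs ≠ []) :
    PySem.Chars.join sep (xs ++ [[]]) = PySem.Chars.join sep xs ++ sep := by
  induction xs with
  | nil => simp at h
  | cons a t ih =>
    cases t with
    | nil => simp [PySem.Chars.join_cons_cons, PySem.Chars.join_singleton, PySem.Chars.join_nil]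
    | cons b u =>
      have := ih (by simp)
      simp only [List.cons_append, PySem.Chars.join_cons_cons] at this ⊢
      rw [this]
      simp

theorem rstrip_append_newline (x : List Char) :
    PySem.Chars.rstrip (x ++ ['\n']) = PySem.Chars.rstrip x := by
  have hsp : PySem.Chars.isspace '\n' = true := by decide
  simp [PySem.Chars.rstrip, List.dropWhile, hsp]

theorem rstrip_join_blank (ls : List String) (h : ls ≠ []) :
    PySem.Str.rstrip (PySem.Str.join "\n" (ls ++ [""])) = PySem.Str.rstrip (PySem.Str.join "\n" ls) := by
  apply String.toList_inj.mp
  simp only [PySem.Str.toList_rstrip, PySem.Str.toList_join]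
  have hmap : (ls ++ [""]).map String.toList = ls.map String.toList ++ [[]] := by simp
  rw [hmap, join_append_blank _ _ (by simpa using h)]
  exact rstrip_append_newline _

theorem ports_agree (rows : List (String × String × String)) (language : String) :
    render_included rows language = render_included_alt rows language := by
  have hA : render_included rows language
      = PySem.Str.rstrip (PySem.Str.join "\n"
          ((PySem.List.sorted2
              (rows.foldl (fun d r => d.modify r.1 [] (fun l => l ++ [r.2.1]))
                (PySem.Dict.empty : PySem.Dict String (List String))).keys
              (fun g => (group_sort_key g).1) (fun g => (group_sort_key g).2)).foldl
            (fun lines group =>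
              let lines :=
                if language == "en" then lines ++ ["Located in `skills/" ++ group ++ "/`:"]
                else if language == "zh-tw" then lines ++ ["位於 `skills/" ++ group ++ "/`："]
                else lines ++ ["位于 `skills/" ++ group ++ "/`："]
              let lines := lines ++ [""]
              let lines :=
                (PySem.List.sorted
                    ((rows.foldl (fun d r => d.modify r.1 [] (fun l => l ++ [r.2.1]))
                      (PySem.Dict.empty : PySem.Dict String (List String))).getD group [])
                    (fun s => s)).foldl
                  (fun ls s => ls ++ ["- `" ++ s ++ "`"]) lines
              lines ++ [""]) [])) ++ "\n" := rfl
  have hB : render_included_alt rows language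
      = PySem.Str.rstrip (PySem.Str.join "\n"
          ((PySem.List.sorted2 (rows.map (fun r => (r.1, r.2.1)))
              (fun p => (toLex (group_sort_key p.1) : Int ×ₗ String)) (fun p => p.2)).foldl
            (stepF (if language == "en" then (fun g => "Located in `skills/" ++ g ++ "/`:")
              else if language == "zh-tw" then (fun g => "位於 `skills/" ++ g ++ "/`：")
              else (fun g => "位于 `skills/" ++ g ++ "/`："))) ([], none)).1) ++ "\n" := rfl
  rw [hA, hB]
  set l := pairsOf rows with hl
  set gs := PySem.List.sorted (PySem.List.dedup (l.map Prod.fst)) gkeyL with hgsdef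
  have htops : rows.map (·.1) = l.map Prod.fst := by
    simp [hl, pairsOf, List.map_map]
  -- A-side group list
  have hAgs : PySem.List.sorted2
      (rows.foldl (fun d r => d.modify r.1 [] (fun l => l ++ [r.2.1]))
        (PySem.Dict.empty : PySem.Dict String (List String))).keys
      (fun g => (group_sort_key g).1) (fun g => (group_sort_key g).2) = gs := by
    rw [keys_grouped, sorted2_eq_sorted_toLex, htops, hgsdef]
    rfl
  -- B-side ordered list
  have hBord : PySem.List.sorted2 (rows.map (fun r => (r.1, r.2.1)))
      (fun p => (toLex (group_sort_key p.1) : Int ×ₗ String)) (fun p => p.2)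
      = gs.flatMap (blkF l) := by
    rw [sorted2_eq_sorted_toLex]
    rw [show (rows.map (fun r => (r.1, r.2.1))) = l from rfl]
    rw [show (fun (p : String × String) => (toLex ((toLex (group_sort_key p.1) : Int ×ₗ String), p.2) : (Int ×ₗ String) ×ₗ String)) = pkeyL from rfl]
    exact ordered_blocks l
  -- B-side header function
  have hhdr : (if language == "en" then (fun g => "Located in `skills/" ++ g ++ "/`:")
      else if language == "zh-tw" then (fun g => "位於 `skills/" ++ g ++ "/`：")
      else (fun g => "位于 `skills/" ++ g ++ "/`：")) = hdrF language := by
    funext g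
    simp only [hdrF]
    split_ifs <;> rfl
  rw [hAgs, hBord, hhdr]
  rw [linesA_eq language gs l _ (fun g _ => getD_grouped rows g)]
  -- facts about gs
  have hgsperm : gs.Perm (PySem.List.dedup (l.map Prod.fst)) := PySem.List.sorted_perm _ _ _
  have hgsnd : gs.Nodup := hgsperm.symm.nodup (PySem.List.nodup_dedup _)
  have hnonnil : ∀ g ∈ gs, shortsOf l g ≠ [] := by
    intro g hg
    have : g ∈ l.map Prod.fst := (PySem.List.mem_dedup _ _).mp (hgsperm.mem_iff.mp hg)
    rcases List.mem_map.mp this with ⟨p, hp, rfl⟩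
    simp only [shortsOf, ne_eq, List.map_eq_nil_iff, List.filter_eq_nil_iff]
    push_neg
    exact ⟨p, hp, by simp⟩
  clear_value gs
  cases gs with
  | nil => simp
  | cons g0 rest =>
    obtain ⟨s0, ss, hss⟩ : ∃ s0 ss, PySem.List.sorted (shortsOf l g0) (fun s => s) = s0 :: ss := by
      rcases hs : PySem.List.sorted (shortsOf l g0) (fun s => s) with _ | ⟨s0, ss⟩
      · exact absurd ((PySem.List.sorted_eq_nil_iff _ _ _).mp hs) (hnonnil g0 (List.mem_cons_self ..))
      · exact ⟨s0, ss, rfl⟩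
    have hpw := List.nodup_iff_pairwise_ne.mp hgsnd
    obtain ⟨hne0, hpwrest⟩ := List.pairwise_cons.mp hpw
    have hBfold : ((g0 :: rest).flatMap (blkF l)).foldl (stepF (hdrF language)) ([], none)
        = ((hdrF language g0 :: "" :: itemsF l g0)
            ++ rest.flatMap (fun g => "" :: hdrF language g :: "" :: itemsF l g),
           some (rest.getLastD g0)) := by
      rw [List.flatMap_cons, List.foldl_append, blkF, hss,
        loop_one_block (hdrF language) g0 s0 ss [] none (by simp)]
      rw [loop_main (hdrF language) l rest _ g0
        (fun g hg => Ne.symm (hne0 g hg))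
        hpwrest
        (fun g hg => hnonnil g (List.mem_cons_of_mem _ hg))]
      simp [itemsF, hss]
    rw [hBfold]
    rw [linesAB]
    rw [rstrip_join_blank _ (by simp)]

-- ===== VERDICT (by name: the statement is the Claim_ definition above) =====
theorem render_included_spec : Claim_equal_render_included := by
  intro rows language _
  unfold Spec_render_included
  exact ports_agree rows language
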